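-- pv_equiv track=rewrite | github.com/tnotesjs/TNotes.leetcode | notes/2086. 喂食仓鼠的最小食物桶数【中等】/solutions/1/1.py | minimumBuckets
-- ===== SOURCE A (Python) =====
-- def minimumBuckets(hamsters: str) -> int:
--     s = list(hamsters)
--     n = len(s)
--     count = 0
--     for i in range(n):
--         if s[i] == 'H':
--             if i > 0 and s[i - 1] == 'B':
--                 continue
--             if i + 1 < n and s[i + 1] == '.':
--                 s[i + 1] = 'B'
--                 count += 1
--             elif i > 0 and s[i - 1] == '.':
--                 s[i - 1] = 'B'
--                 count += 1
--             else:
--                 return -1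
--     return count
-- ===== SOURCE B (Python) =====
-- def minimumBuckets(hamsters: str) -> int:
--     # Static pattern analysis, no simulation: feasible iff every hamster has an
--     # empty cell next to it; then every hamster needs a bucket, and each
--     # non-overlapping 'H.H' lets two hamsters share the middle bucket.
--     padded = 'x' + hamsters + 'x'
--     if any(c == 'H' and l != '.' and r != '.'
--            for l, c, r in zip(padded, padded[1:], padded[2:])):
--         return -1
--     return hamsters.count('H') - hamsters.count('H.H')
-- ===== Notes on version B (the rewrite author's own statement) =====
-- stated objective: alternative
-- what changed: Replaces A's greedy left-to-right simulation (index loop mutating a copied char list, placing and remembering buckets) with a static pattern analysis: a feasibility test (every hamster must have an adjacent empty cell) followed by the closed-form count hamsters.count("H") - hamsters.count("H.H"), since each non-overlapping "H.H" lets two hamsters share one bucket.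
-- outside the precondition, e.g. on minimumBuckets('BH'): A returns 0, B returns -1; on minimumBuckets('BH.'): A returns 0, B returns 1
import Mathlib
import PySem

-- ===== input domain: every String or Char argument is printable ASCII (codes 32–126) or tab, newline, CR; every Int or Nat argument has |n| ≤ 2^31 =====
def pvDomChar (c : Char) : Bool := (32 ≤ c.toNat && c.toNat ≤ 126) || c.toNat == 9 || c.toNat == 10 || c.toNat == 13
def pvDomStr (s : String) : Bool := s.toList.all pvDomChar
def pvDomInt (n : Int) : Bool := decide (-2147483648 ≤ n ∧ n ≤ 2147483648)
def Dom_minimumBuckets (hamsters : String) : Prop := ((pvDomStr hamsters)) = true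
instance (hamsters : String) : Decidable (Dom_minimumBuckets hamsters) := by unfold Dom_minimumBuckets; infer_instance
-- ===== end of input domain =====

-- B replaces A's greedy mutating simulation by a static pattern analysis: a feasibility
-- test (every hamster needs an adjacent empty cell) plus the closed-form count
-- hamsters.count("H") - hamsters.count("H.H") (objective: alternative, same O(n) cost).

-- ===== PORT A =====
-- Index loop of A; list indexing s[i] etc. is always in range here (0 ≤ i < n = s.length),
-- so List.getD is exact for Python's s[i].
def pvLoopA (s : List Char) (n i : Nat) (count : Int) : Int :=
  if _h : i < n then
    if s.getD i ' ' = 'H' then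
      if 0 < i ∧ s.getD (i - 1) ' ' = 'B' then
        pvLoopA s n (i + 1) count
      else if i + 1 < n ∧ s.getD (i + 1) ' ' = '.' then
        pvLoopA (s.set (i + 1) 'B') n (i + 1) (count + 1)
      else if 0 < i ∧ s.getD (i - 1) ' ' = '.' then
        pvLoopA (s.set (i - 1) 'B') n (i + 1) (count + 1)
      else
        -1
    else
      pvLoopA s n (i + 1) count
  else
    count
termination_by n - i

def minimumBuckets (hamsters : String) : Int :=
  pvLoopA hamsters.toList hamsters.toList.length 0 0

-- ===== PORT B =====
-- Source B: padded = 'x' + hamsters + 'x'; any(c=='H' and l!='.' and r!='.' for l,c,r in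
-- zip(padded, padded[1:], padded[2:])) → -1; else count('H') - count('H.H').
-- padded[1:] / padded[2:] are List.drop 1 / 2 (exact: non-negative slice from the start);
-- the 3-way zip is the nested pair zip; str.count is PySem.Str.count (non-overlapping).
def minimumBuckets_alt (hamsters : String) : Int :=
  let padded : List Char := 'x' :: hamsters.toList ++ ['x']
  if (padded.zip ((padded.drop 1).zip (padded.drop 2))).any
      (fun t => t.2.1 == 'H' && !(t.1 == '.') && !(t.2.2 == '.')) then
    -1
  else
    (PySem.Str.count hamsters "H" : Int) - (PySem.Str.count hamsters "H.H" : Int)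

-- ===== PRECONDITION & SPEC =====
-- Pre_ excludes strings containing the substring "BH": the bucket character that A writes
-- into its working list is also a possible input character, so in such strings a
-- pre-existing bucket directly before a hamster is read by A as feeding it — an
-- unspecified corner with two defensible readings (A: such a bucket feeds the hamster
-- to its right; B: a stray bucket character is just a wall).
def Pre_minimumBuckets (hamsters : String) : Prop := PySem.Str.isIn "BH" hamsters = false
instance (hamsters : String) : Decidable (Pre_minimumBuckets hamsters) := by unfold Pre_minimumBuckets; infer_instance
def pvWitness_minimumBuckets : String := "H.H"

def Spec_minimumBuckets (hamsters : String) (out : Int) : Prop := out = minimumBuckets_alt hamsters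
instance (hamsters : String) (out : Int) : Decidable (Spec_minimumBuckets hamsters out) := by unfold Spec_minimumBuckets; infer_instance

-- ===== CLAIM (what is proved, stated in full; the proofs are below) =====
def Claim_equal_minimumBuckets : Prop := ∀ (hamsters : String), Dom_minimumBuckets hamsters → Pre_minimumBuckets hamsters → Spec_minimumBuckets hamsters (minimumBuckets hamsters)

-- ===== LEMMAS AND PROOFS =====

-- A's loop as a clean left-to-right state recursion: prev = effective previous character
-- (none at the left edge), ov = the current position was overwritten with a bucket.
def pvLoopB (cs : List Char) (prev : Option Char) (curOv : Bool) (count : Int) : Int :=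
  match cs with
  | [] => count
  | c :: rest =>
    let nxt : Option Char := rest.head?
    let eff : Char := if curOv then 'B' else c
    if c = 'H' then
      if prev = some 'B' then pvLoopB rest (some eff) false count
      else if nxt = some '.' then pvLoopB rest (some eff) true (count + 1)
      else if prev = some '.' then pvLoopB rest (some eff) false (count + 1)
      else -1
    else
      pvLoopB rest (some eff) false count

-- The suffix of A's mutated list at step i = t.length: the head may carry a freshly placed bucket.
def pvEff (suf : List Char) (ov : Bool) : List Char :=
  match suf with
  | [] => []
  | c :: r => (if ov then 'B' else c) :: r

lemma pvEff_false (suf : List Char) : pvEff suf false = suf := by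
  cases suf <;> rfl

lemma pv_getD_mid (t r : List Char) (e d : Char) : (t ++ e :: r).getD t.length d = e := by
  rw [List.getD_append_right _ _ _ _ (le_refl _)]; simp

lemma pv_getD_mid1 (t r : List Char) (e d : Char) :
    (t ++ e :: r).getD (t.length + 1) d = r.getD 0 d := by
  rw [List.getD_append_right _ _ _ _ (by omega)]; simp

lemma pv_getD_prev (t r : List Char) (p e d : Char) :
    ((t ++ [p]) ++ e :: r).getD ((t ++ [p]).length - 1) d = p := by
  rw [List.getD_append _ _ _ _ (by simp)]
  have : (t ++ [p]).length - 1 = t.length := by simp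
  rw [this, pv_getD_mid]

lemma pv_set_mid1 (t r : List Char) (e b : Char) :
    (t ++ e :: r).set (t.length + 1) b = t ++ e :: r.set 0 b := by
  rw [List.set_append]; simp

lemma pv_set_prev (t r : List Char) (p e b : Char) :
    ((t ++ [p]) ++ e :: r).set ((t ++ [p]).length - 1) b = (t ++ [b]) ++ e :: r := by
  rw [List.set_append]
  have h1 : (t ++ [p]).length - 1 = t.length := by simp
  rw [h1, if_pos (by simp), List.set_append, if_neg (by omega)]
  simp

lemma pv_prev_iff (t r : List Char) (e d y : Char) :
    (0 < t.length ∧ (t ++ e :: r).getD (t.length - 1) d = y) ↔ t.getLast? = some y := by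
  cases t using List.reverseRecOn with
  | nil => simp
  | append_singleton t₀ p => rw [pv_getD_prev]; simp

lemma pv_key (suf : List Char) : ∀ (t : List Char) (ov : Bool) (count : Int),
    (ov = true → suf.head? = some '.') →
    pvLoopA (t ++ pvEff suf ov) (t.length + suf.length) t.length count
      = pvLoopB suf t.getLast? ov count := by
  induction suf with
  | nil =>
    intro t ov count _
    rw [pvLoopA]
    simp [pvLoopB]
  | cons c rest ih =>
    intro t ov count hov
    cases ov with
    | true =>
      have hc : c = '.' := by simpa using hov rfl
      subst hc
      rw [pvLoopA, dif_pos (by simp)]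
      simp only [pvEff, ite_true]
      rw [pv_getD_mid, if_neg (by decide)]
      have h := ih (t ++ ['B']) false count (by simp)
      rw [pvEff_false] at h
      simp only [List.append_assoc, List.singleton_append, List.length_append,
        List.length_singleton, List.getLast?_concat] at h
      rw [show t.length + ('.' :: rest).length = t.length + 1 + rest.length by simp; omega]
      rw [h]
      simp [pvLoopB]
    | false =>
      simp only [pvEff, Bool.false_eq_true, ite_false]
      rw [pvLoopA, dif_pos (by simp), pv_getD_mid]
      by_cases hc : c = 'H'
      case neg =>
        rw [if_neg hc]
        have h := ih (t ++ [c]) false count (by simp)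
        rw [pvEff_false] at h
        simp only [List.append_assoc, List.singleton_append, List.length_append,
          List.length_singleton, List.getLast?_concat] at h
        rw [show t.length + (c :: rest).length = t.length + 1 + rest.length by
          simp only [List.length_cons]; omega]
        rw [h]
        simp [pvLoopB, hc]
      case pos =>
        subst hc
        rw [if_pos rfl]
        by_cases hB : t.getLast? = some 'B'
        · rw [if_pos ((pv_prev_iff t rest 'H' ' ' 'B').mpr hB)]
          have h := ih (t ++ ['H']) false count (by simp)
          rw [pvEff_false] at h
          simp only [List.append_assoc, List.singleton_append, List.length_append,
            List.length_singleton, List.getLast?_concat] at h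
          rw [show t.length + ('H' :: rest).length = t.length + 1 + rest.length by
            simp only [List.length_cons]; omega]
          rw [h]
          simp [pvLoopB, hB]
        · rw [if_neg (fun hcond => hB ((pv_prev_iff t rest 'H' ' ' 'B').mp hcond))]
          cases rest with
          | nil =>
            rw [if_neg (by simp)]
            by_cases hp : t.getLast? = some '.'
            · rw [if_pos ((pv_prev_iff t [] 'H' ' ' '.').mpr hp)]
              cases t using List.reverseRecOn with
              | nil => simp at hp
              | append_singleton t₀ p =>
                rw [pv_set_prev, pvLoopA, dif_neg (by simp)]
                simp [pvLoopB, hp]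
            · rw [if_neg (fun hcond => hp ((pv_prev_iff t [] 'H' ' ' '.').mp hcond))]
              simp [pvLoopB, hB, hp]
          | cons d r' =>
            by_cases hd : d = '.'
            · subst hd
              rw [if_pos ⟨by simp, by rw [pv_getD_mid1]; rfl⟩]
              rw [pv_set_mid1]
              have h := ih (t ++ ['H']) true (count + 1) (by simp)
              simp only [pvEff, ite_true, List.append_assoc, List.singleton_append,
                List.length_append, List.length_singleton, List.getLast?_concat] at h
              rw [show t.length + ('H' :: '.' :: r').length = t.length + 1 + ('.' :: r').length
                by simp; omega]
              rw [show ('.' :: r').set 0 'B' = 'B' :: r' from rfl, h]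
              simp [pvLoopB, hB]
            · rw [if_neg (by simp [hd])]
              by_cases hp : t.getLast? = some '.'
              · rw [if_pos ((pv_prev_iff t (d :: r') 'H' ' ' '.').mpr hp)]
                cases t using List.reverseRecOn with
                | nil => simp at hp
                | append_singleton t₀ p =>
                  rw [pv_set_prev]
                  have h := ih ((t₀ ++ ['B']) ++ ['H']) false (count + 1) (by simp)
                  rw [pvEff_false, List.getLast?_concat] at h
                  have hR : pvLoopB ('H' :: d :: r') (t₀ ++ [p]).getLast? false count
                      = pvLoopB (d :: r') (some 'H') false (count + 1) := by
                    rw [pvLoopB]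
                    simp only [List.head?_cons, Option.some.injEq, hd, hp, ite_true,
                      ite_false, Bool.false_eq_true]
                    rw [if_neg (by decide)]
                  rw [hR]
                  refine Eq.trans ?_ h
                  congr 1 <;> simp
                  omega
              · rw [if_neg (fun hcond => hp ((pv_prev_iff t (d :: r') 'H' ' ' '.').mp hcond))]
                simp [pvLoopB, hB, hp, hd]

-- ---- B-side characterisation helpers (proof only) ----

-- feasibility of a suffix, given whether the previous original character is '.'
def pvFeas (pD : Bool) : List Char → Bool
  | [] => true
  | c :: r => (!(c == 'H') || pD || r.head? == some '.') && pvFeas (c == '.') r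

-- non-overlapping count of "H.H" (Python str.count semantics)
def pvHDH : List Char → Nat
  | [] => 0
  | c :: t =>
    if c = 'H' ∧ t.take 2 = ['.', 'H'] then 1 + pvHDH (t.drop 2) else pvHDH t
termination_by l => l.length
decreasing_by
  · simp only [List.length_cons]; have := List.length_drop (l := t) (i := 2); omega
  · simp

-- state after a freshly placed bucket ('B' on the previous cell)
def pvFeasB (r : List Char) : Bool :=
  if r.head? = some 'H' then pvFeas false r.tail else pvFeas false r

def pvNB (r : List Char) : Int :=
  if r.head? = some 'H' then (r.tail.count 'H' : Int) - (pvHDH r.tail : Int)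
  else (r.count 'H' : Int) - (pvHDH r : Int)

-- the triple stream zip(p, p[1:], p[2:]) as a structural recursion
def pvTrips : List Char → List (Char × Char × Char)
  | a :: b :: c :: r => (a, b, c) :: pvTrips (b :: c :: r)
  | _ => []

lemma pv_zip_eq_trips : ∀ (p : List Char),
    p.zip ((p.drop 1).zip (p.drop 2)) = pvTrips p
  | [] => rfl
  | [_] => rfl
  | [_, _] => rfl
  | a :: b :: c :: r => by simpa [pvTrips] using pv_zip_eq_trips (b :: c :: r)
termination_by p => p.length

lemma pv_any_trips (cs : List Char) : ∀ (p : Char),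
    (pvTrips (p :: cs ++ ['x'])).any
      (fun t => t.2.1 == 'H' && !(t.1 == '.') && !(t.2.2 == '.')) = !pvFeas (p == '.') cs := by
  induction cs with
  | nil => intro p; simp [pvTrips, pvFeas]
  | cons c r ih =>
    intro p
    cases r with
    | nil =>
      simp only [List.cons_append, List.nil_append, pvTrips, List.any_cons, List.any_nil,
        pvFeas, List.head?_nil]
      cases hc : c == 'H' <;> cases hp : p == '.' <;> simp
    | cons d r' =>
      have h := ih c
      simp only [List.cons_append] at h ⊢
      rw [show pvTrips (p :: c :: d :: (r' ++ ['x'])) = (p, c, d) :: pvTrips (c :: d :: (r' ++ ['x'])) from rfl]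
      rw [List.any_cons, h]
      simp only [pvFeas, List.head?_cons, Option.some_beq_some]
      cases hc : c == 'H' <;> cases hp : p == '.' <;> cases hd : d == '.' <;>
        cases hf : pvFeas (c == '.') (d :: r') <;> simp

lemma pv_take2_iff (t : List Char) : t.take 2 = ['.', 'H'] ↔ ∃ r, t = '.' :: 'H' :: r := by
  match t with
  | [] => simp
  | [d] => simp
  | d :: e :: r =>
    show [d, e] = ['.', 'H'] ↔ _
    constructor
    · intro h
      simp only [List.cons.injEq, and_true] at h
      exact ⟨r, by rw [h.1, h.2]⟩
    · rintro ⟨r', hr⟩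
      simp only [List.cons.injEq] at hr
      rw [hr.1, hr.2.1]

lemma pv_prefix_iff (c : Char) (t : List Char) :
    List.isPrefixOf ['H', '.', 'H'] (c :: t) = true ↔ (c = 'H' ∧ t.take 2 = ['.', 'H']) := by
  match t with
  | [] => simp [List.isPrefixOf]
  | [d] => simp [List.isPrefixOf]
  | d :: e :: r =>
    show (('H' == c) && (('.' == d) && (('H' == e) && List.isPrefixOf [] r))) = true ↔ _
    rw [pv_take2_iff]
    simp only [List.isPrefixOf, Bool.and_true, Bool.and_eq_true, beq_iff_eq]
    constructor
    · rintro ⟨h1, h2, h3⟩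
      exact ⟨h1.symm, r, by rw [← h2, ← h3]⟩
    · rintro ⟨h1, r', hr⟩
      simp only [List.cons.injEq] at hr
      exact ⟨h1.symm, hr.1.symm, hr.2.1.symm⟩

lemma pv_count_go_H (fuel : Nat) : ∀ (s : List Char) (acc : Nat), s.length ≤ fuel →
    PySem.Chars.count.go ['H'] fuel s acc = acc + s.count 'H' := by
  induction fuel with
  | zero => intro s acc h
            have hs : s = [] := List.eq_nil_of_length_eq_zero (Nat.le_zero.mp h)
            subst hs; rfl
  | succ f ih =>
    intro s acc h
    cases s with
    | nil => rfl
    | cons c t =>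
      rw [PySem.Chars.count.go]
      by_cases hc : c = 'H'
      · subst hc
        rw [if_pos (by simp [List.isPrefixOf])]
        simp only [List.length_nil, List.drop_zero, List.drop_succ_cons, List.length_cons]
        rw [ih t (acc + 1) (by simpa using h)]
        simp [List.count_cons]
        omega
      · rw [if_neg (by simp [List.isPrefixOf]; exact fun he => hc he.symm)]
        rw [ih t acc (by simpa using h)]
        simp [hc]

lemma pv_count_go_HdH (fuel : Nat) : ∀ (s : List Char) (acc : Nat), s.length ≤ fuel →
    PySem.Chars.count.go ['H', '.', 'H'] fuel s acc = acc + pvHDH s := by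
  induction fuel with
  | zero => intro s acc h
            have hs : s = [] := List.eq_nil_of_length_eq_zero (Nat.le_zero.mp h)
            subst hs; rw [pvHDH]; rfl
  | succ f ih =>
    intro s acc h
    cases s with
    | nil => rw [pvHDH]; rfl
    | cons c t =>
      rw [PySem.Chars.count.go]
      by_cases hp : List.isPrefixOf ['H', '.', 'H'] (c :: t) = true
      · rw [if_pos hp]
        obtain ⟨hc, ht⟩ := (pv_prefix_iff c t).mp hp
        obtain ⟨r, hr⟩ := (pv_take2_iff t).mp ht
        subst hc; subst hr
        simp only [List.length_cons, List.drop_succ_cons, List.length_nil, List.drop_zero]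
        rw [ih r (acc + 1) (by simp at h ⊢; omega)]
        rw [pvHDH, if_pos (by simp)]
        simp only [List.drop_succ_cons, List.drop_zero]
        omega
      · rw [if_neg hp]
        rw [ih t acc (by simpa using h)]
        rw [show pvHDH (c :: t) = pvHDH t from by
          rw [pvHDH, if_neg (fun hct => hp ((pv_prefix_iff c t).mpr hct))]]

lemma pv_feasB_eq (r : List Char) : pvFeasB r = pvFeas true r := by
  cases r with
  | nil => rfl
  | cons c r3 =>
    by_cases hc : c = 'H'
    · subst hc
      rw [pvFeasB, if_pos (by simp)]
      simp [pvFeas]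
    · rw [pvFeasB, if_neg (by simp [hc])]
      simp [pvFeas, hc]

lemma pv_NB_eq (r : List Char) :
    pvNB r + 1 = (('H' :: '.' :: r).count 'H' : Int) - (pvHDH ('H' :: '.' :: r) : Int) := by
  cases r with
  | nil =>
    rw [pvNB, if_neg (by simp)]
    rw [show pvHDH ('H' :: '.' :: ([] : List Char)) = 0 from by
      rw [pvHDH, if_neg (by simp), pvHDH, if_neg (by simp), pvHDH]]
    rw [show pvHDH ([] : List Char) = 0 from by rw [pvHDH]]
    simp
  | cons d r3 =>
    by_cases hd : d = 'H'
    · subst hd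
      rw [pvNB, if_pos (show ('H' :: r3).head? = some 'H' from rfl)]
      rw [show pvHDH ('H' :: '.' :: 'H' :: r3) = 1 + pvHDH r3 from by
        rw [pvHDH, if_pos (by simp)]; simp]
      show (r3.count 'H' : Int) - (pvHDH r3 : Int) + 1 = _
      simp [List.count_cons]
      push_cast
      omega
    · rw [pvNB, if_neg (by simp [hd])]
      rw [show pvHDH ('H' :: '.' :: d :: r3) = pvHDH (d :: r3) from by
        rw [pvHDH, if_neg (fun hcond => hd (by simpa [List.take] using hcond.2)),
          pvHDH, if_neg (by simp)]]
      simp [List.count_cons, hd]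
      omega

-- no 'B' immediately followed by 'H' anywhere (the trigger of A's marker quirk)
def pvNoBH : List Char → Bool
  | [] => true
  | [_] => true
  | a :: b :: r => !(a == 'B' && b == 'H') && pvNoBH (b :: r)

lemma pv_noBH_tail (c : Char) (rest : List Char) (h : pvNoBH (c :: rest) = true) :
    pvNoBH rest = true := by
  cases rest with
  | nil => rfl
  | cons b r => exact (Bool.and_eq_true_iff.mp h).2

lemma pv_noBH_pair (c : Char) (rest : List Char) (h : pvNoBH (c :: rest) = true)
    (hc : c = 'B') : rest.head? ≠ some 'H' := by
  cases rest with
  | nil => simp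
  | cons b r =>
    subst hc
    have h1 := (Bool.and_eq_true_iff.mp h).1
    simp only [List.head?_cons, ne_eq, Option.some.injEq]
    intro hb
    subst hb
    simp at h1

lemma pv_noBH_of_not_infix : ∀ (cs : List Char), ¬ (['B', 'H'] <:+: cs) → pvNoBH cs = true := by
  intro cs
  induction cs with
  | nil => intro _; rfl
  | cons a r ih =>
    intro hinf
    cases r with
    | nil => rfl
    | cons b r' =>
      rw [pvNoBH, Bool.and_eq_true_iff]
      refine ⟨?_, ih (fun hi => hinf (hi.trans (List.infix_cons (List.infix_refl _))))⟩
      by_contra hab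
      simp only [Bool.not_eq_true', Bool.not_eq_false, Bool.and_eq_true_iff, beq_iff_eq] at hab
      exact hinf ⟨[], r', by rw [hab.1, hab.2]; rfl⟩

-- main characterisation of A's loop on "BH"-free input
lemma pv_main : ∀ (n : Nat) (cs : List Char), cs.length ≤ n → pvNoBH cs = true →
    (∀ (prev : Option Char) (cnt : Int), (prev = some 'B' → cs.head? ≠ some 'H') →
        pvLoopB cs prev false cnt =
          if pvFeas (prev == some '.') cs then cnt + (cs.count 'H' : Int) - (pvHDH cs : Int) else -1)
    ∧ (∀ (cnt : Int),
        pvLoopB cs (some 'B') false cnt = if pvFeasB cs then cnt + pvNB cs else -1) := by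
  intro n
  induction n with
  | zero =>
    intro cs h _
    have hcs : cs = [] := List.eq_nil_of_length_eq_zero (Nat.le_zero.mp h)
    subst hcs
    constructor
    · intro prev cnt _
      simp [pvLoopB, pvFeas, pvHDH]
    · intro cnt
      simp [pvLoopB, pvFeasB, pvFeas, pvNB, pvHDH]
  | succ m ih =>
    intro cs h hno
    constructor
    · -- part 1
      intro prev cnt hprev
      cases cs with
      | nil => simp [pvLoopB, pvFeas, pvHDH]
      | cons c rest =>
        have hnoR : pvNoBH rest = true := pv_noBH_tail c rest hno
        by_cases hc : c = 'H'
        · subst hc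
          have hpB : prev ≠ some 'B' := fun hx => hprev hx rfl
          rw [pvLoopB]
          simp only [ite_true, if_pos rfl, Bool.false_eq_true, if_neg (fun hh => hpB hh),
            ite_false]
          by_cases hnxt : rest.head? = some '.'
          · rw [if_pos hnxt]
            obtain ⟨r2, hr2⟩ : ∃ r2, rest = '.' :: r2 := by
              cases rest with
              | nil => simp at hnxt
              | cons d r2 => exact ⟨r2, by simp at hnxt; rw [hnxt]⟩
            subst hr2
            rw [pvLoopB, if_neg (by decide)]
            simp only [ite_true]
            have h2 := (ih r2 (by simp at h; omega)
              (pv_noBH_tail _ _ hnoR)).2 (cnt + 1)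
            rw [h2]
            have hfe : pvFeas (prev == some '.') ('H' :: '.' :: r2) = pvFeasB r2 := by
              rw [pv_feasB_eq]
              simp [pvFeas]
            rw [hfe]
            have hnb := pv_NB_eq r2
            by_cases hfb : pvFeasB r2
            · rw [if_pos hfb, if_pos hfb]
              omega
            · rw [if_neg hfb, if_neg hfb]
          · rw [if_neg hnxt]
            by_cases hpd : prev = some '.'
            · rw [if_pos hpd]
              have h1 := (ih rest (by simp at h; omega) hnoR).1 (some 'H') (cnt + 1)
                (fun hx => absurd hx (by decide))
              rw [h1]
              have hfe : pvFeas (prev == some '.') ('H' :: rest)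
                  = pvFeas ((some 'H' : Option Char) == some '.') rest := by
                simp [pvFeas, hpd]
              rw [hfe]
              have hhd : pvHDH ('H' :: rest) = pvHDH rest := by
                rw [pvHDH, if_neg ?_]
                rintro ⟨-, ht⟩
                obtain ⟨r', hr⟩ := (pv_take2_iff rest).mp ht
                exact hnxt (by rw [hr]; rfl)
              rw [hhd]
              have hcc : ('H' :: rest).count 'H' = rest.count 'H' + 1 := by
                simp [List.count_cons]
              rw [hcc]
              by_cases hf : pvFeas ((some 'H' : Option Char) == some '.') rest
              · rw [if_pos hf, if_pos hf]
                push_cast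
                omega
              · rw [if_neg hf, if_neg hf]
            · rw [if_neg hpd]
              have hcond : pvFeas (prev == some '.') ('H' :: rest) = false := by
                have h1 : (prev == some '.') = false := by
                  cases prev with
                  | none => rfl
                  | some x => simp; exact fun hx => hpd (by rw [hx])
                have h2 : (rest.head? == some '.') = false := by
                  simp; exact hnxt
                simp [pvFeas, h1, h2]
              rw [hcond]
              simp
        · rw [pvLoopB]
          simp only [Bool.false_eq_true, ite_false, if_neg hc]
          have h1 := (ih rest (by simp at h; omega) hnoR).1 (some c) cnt
            (fun hx => pv_noBH_pair c rest hno (by simpa using hx))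
          rw [h1]
          have hfe : pvFeas (prev == some '.') (c :: rest)
              = pvFeas ((some c : Option Char) == some '.') rest := by
            have : (!(c == 'H')) = true := by simp [hc]
            simp [pvFeas, this]
          rw [hfe]
          have hhd : pvHDH (c :: rest) = pvHDH rest := by
            rw [pvHDH, if_neg (fun hct => hc hct.1)]
          have hcc : (c :: rest).count 'H' = rest.count 'H' := by
            simp [List.count_cons, hc]
          rw [hhd, hcc]
    · -- part 2
      intro cnt
      cases cs with
      | nil => simp [pvLoopB, pvFeasB, pvFeas, pvNB, pvHDH]
      | cons c rest =>
        have hnoR : pvNoBH rest = true := pv_noBH_tail c rest hno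
        by_cases hc : c = 'H'
        · subst hc
          rw [pvLoopB]
          simp only [ite_true, if_pos rfl, Bool.false_eq_true, ite_false]
          have h1 := (ih rest (by simp at h; omega) hnoR).1 (some 'H') cnt
            (fun hx => absurd hx (by decide))
          rw [h1]
          rw [show pvFeasB ('H' :: rest) = pvFeas ((some 'H' : Option Char) == some '.') rest from by
            rw [pvFeasB, if_pos (by simp)]; rfl]
          rw [show pvNB ('H' :: rest)
              = (rest.count 'H' : Int) - (pvHDH rest : Int) from by
            rw [pvNB, if_pos (by simp)]; simp]
          split <;> omega
        · rw [pvLoopB]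
          simp only [Bool.false_eq_true, ite_false, if_neg hc]
          have h1 := (ih rest (by simp at h; omega) hnoR).1 (some c) cnt
            (fun hx => pv_noBH_pair c rest hno (by simpa using hx))
          rw [h1]
          have hfb : pvFeasB (c :: rest) = pvFeas ((some c : Option Char) == some '.') rest := by
            rw [pvFeasB, if_neg (by simp; exact fun hx => hc hx)]
            have : (!(c == 'H')) = true := by simp [hc]
            simp [pvFeas, this]
          rw [hfb]
          have hnb : pvNB (c :: rest) = (rest.count 'H' : Int) - (pvHDH rest : Int) := by
            rw [pvNB, if_neg (by simp; exact fun hx => hc hx)]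
            rw [show pvHDH (c :: rest) = pvHDH rest from by
              rw [pvHDH, if_neg (fun hct => hc hct.1)]]
            simp [List.count_cons, hc]
          rw [hnb]
          split <;> omega

-- ===== VERDICT (by name: the statement is the Claim_ definition above) =====
theorem minimumBuckets_spec : Claim_equal_minimumBuckets := by
  intro hstr _ hpre
  unfold Spec_minimumBuckets minimumBuckets minimumBuckets_alt
  have hno : pvNoBH hstr.toList = true := by
    apply pv_noBH_of_not_infix
    intro hinf
    have := (PySem.Str.isIn_iff_infix (sub := "BH") (s := hstr)).mpr
      (by simpa using hinf)
    rw [hpre] at this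
    exact Bool.false_ne_true this
  have hA : pvLoopA hstr.toList hstr.toList.length 0 0 = pvLoopB hstr.toList none false 0 := by
    have := pv_key hstr.toList [] false 0 (by simp)
    simpa [pvEff_false] using this
  rw [hA]
  have hmain := (pv_main hstr.toList.length hstr.toList (le_refl _) hno).1 none 0
    (fun hx => absurd hx (by decide))
  rw [hmain]
  show _ = (if (('x' :: hstr.toList ++ ['x']).zip
        ((('x' :: hstr.toList ++ ['x']).drop 1).zip (('x' :: hstr.toList ++ ['x']).drop 2))).any
      (fun t => t.2.1 == 'H' && !(t.1 == '.') && !(t.2.2 == '.')) = true then -1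
    else (PySem.Str.count hstr "H" : Int) - (PySem.Str.count hstr "H.H" : Int))
  rw [show ('x' :: hstr.toList ++ ['x']).zip
        ((('x' :: hstr.toList ++ ['x']).drop 1).zip (('x' :: hstr.toList ++ ['x']).drop 2))
      = pvTrips ('x' :: hstr.toList ++ ['x']) from pv_zip_eq_trips _]
  rw [pv_any_trips hstr.toList 'x']
  have hcount1 : PySem.Str.count hstr "H" = hstr.toList.count 'H' := by
    rw [PySem.Str.count, show ("H" : String).toList = ['H'] from by decide,
      PySem.Chars.count, if_neg (by decide), pv_count_go_H _ _ 0 (le_refl _)]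
    omega
  have hcount2 : PySem.Str.count hstr "H.H" = pvHDH hstr.toList := by
    rw [PySem.Str.count, show ("H.H" : String).toList = ['H', '.', 'H'] from by decide,
      PySem.Chars.count, if_neg (by decide), pv_count_go_HdH _ _ 0 (le_refl _)]
    omega
  rw [hcount1, hcount2]
  rw [show ((none : Option Char) == some '.') = false from rfl,
    show (('x' : Char) == '.') = false from by decide]
  by_cases hf : pvFeas false hstr.toList
  · rw [if_pos hf, hf]
    simp
  · rw [if_neg (by simpa using hf)]
    rw [show pvFeas false hstr.toList = false from by simpa using hf]
    simp
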